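-- pv_equiv track=rewrite | github.com/charlesjhlee/mitx_6.00.1x | nfruits.py | nfruits
-- ===== SOURCE A (Python) =====
-- def nfruits(dictionary, fruitpattern):
--
--     # need to loop through all elements in fruitpattern
--     for i in range(len(fruitpattern)-1):
--
--     # for each character found in fruitpattern string excluding last character, check if key of this string exists in dictionary
--     # if key of this string exists, subtract 1 from value
--     # for other keys, add 1 to each of the values
--
--         for key in dictionary.keys():
--
--             if key == fruitpattern[i]:
--                 dictionary[key] = dictionary[key] - 1
--             else:
--                 dictionary[key] = dictionary[key] + 1
--
--
--     # for last character in fruitpattern, key from dictionary with same character has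
--     # value of 1 subtracted.
--     # however, rest of the keys' values are not affected.
--     for key in dictionary.keys():
--         if key == fruitpattern[len(fruitpattern)-1]:
--             dictionary[key] = dictionary[key] - 1
--
--     # return max of the values
--     return max(dictionary.values())
-- ===== SOURCE B (Python) =====
-- def nfruits(dictionary, fruitpattern):
--     # One pass over the pattern prefix to count occurrences, then a closed-form
--     # value per key: v + (len-1) - 2*prefix_count(key) - (key == last char).
--     # Note: unlike A, this does not mutate `dictionary`; equivalence is about the
--     # return value only.
--     prefix_counts = {}
--     for ch in fruitpattern[:-1]:
--         prefix_counts[ch] = prefix_counts.get(ch, 0) + 1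
--     last = fruitpattern[-1]
--     bump = len(fruitpattern) - 1
--     return max(v + bump - 2 * prefix_counts.get(k, 0) - (k == last)
--                for k, v in dictionary.items())
-- ===== Notes on version B (the rewrite author's own statement) =====
-- stated objective: faster
-- what changed: Replaces the per-character scan over the whole dict (len(pattern) passes mutating every value) with one counting pass over the pattern prefix and a closed-form value v + (len-1) - 2*count(key) - (key == last) per key.
import Mathlib
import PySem

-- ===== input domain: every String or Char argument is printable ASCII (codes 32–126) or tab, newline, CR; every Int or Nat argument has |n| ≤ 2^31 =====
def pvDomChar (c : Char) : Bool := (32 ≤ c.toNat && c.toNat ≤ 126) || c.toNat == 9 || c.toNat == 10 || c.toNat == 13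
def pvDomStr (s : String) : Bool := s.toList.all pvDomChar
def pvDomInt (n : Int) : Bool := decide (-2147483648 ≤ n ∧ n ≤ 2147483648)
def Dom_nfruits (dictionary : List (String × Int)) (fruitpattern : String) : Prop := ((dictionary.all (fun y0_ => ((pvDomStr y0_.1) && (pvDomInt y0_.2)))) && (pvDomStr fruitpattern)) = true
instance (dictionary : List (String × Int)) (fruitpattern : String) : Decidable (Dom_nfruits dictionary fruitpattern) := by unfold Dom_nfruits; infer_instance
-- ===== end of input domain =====

-- B replaces A's per-character full-dict mutation passes with one counting pass over the
-- pattern prefix plus a closed-form value per key (faster); A mutates `dictionary` in place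
-- (the equivalence proved here is about the RETURN value only; B does not mutate).


-- ===== PORT A =====
-- inner `for key in dictionary.keys(): ...` loop of A (one pattern character t)
def nfruitsInner (t : String) (d : PySem.Dict String Int) : PySem.Dict String Int :=
  d.keys.foldl (fun d key =>
    if key == t then d.insert key (d.getD key 0 - 1)
    else d.insert key (d.getD key 0 + 1)) d

def nfruits (dictionary : List (String × Int)) (fruitpattern : String) : Int :=
  let d0 := PySem.Dict.ofList dictionary
  let n : Int := PySem.Str.len fruitpattern
  let d1 := (PySem.List.pyRange 0 (n - 1) 1).foldl
      (fun d i => nfruitsInner ((PySem.Str.pyGet? fruitpattern i).elim "" (fun c => String.mk [c])) d) d0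
  let tl := (PySem.Str.pyGet? fruitpattern (n - 1)).elim "" (fun c => String.mk [c])
  let d2 := d1.keys.foldl (fun d key =>
      if key == tl then d.insert key (d.getD key 0 - 1) else d) d1
  (PySem.List.max? d2.values (fun v => v)).getD 0

-- ===== PORT B =====
def nfruits_alt (dictionary : List (String × Int)) (fruitpattern : String) : Int :=
  let d0 := PySem.Dict.ofList dictionary
  let prefStrs := (PySem.Str.slice fruitpattern none (some (-1))).toList.map (fun c => String.mk [c])
  let pre := prefStrs.foldl (fun d s => d.insert s (d.getD s 0 + 1)) PySem.Dict.empty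
  let last := (PySem.Str.pyGet? fruitpattern (-1)).elim "" (fun c => String.mk [c])
  let bump : Int := PySem.Str.len fruitpattern - 1
  let vals := d0.items.map (fun kv =>
    kv.2 + bump - 2 * pre.getD kv.1 0 - (if kv.1 == last then 1 else 0))
  (PySem.List.max? vals (fun v => v)).getD 0

-- ===== PRECONDITION & SPEC =====
-- Pre_ excludes exactly the inputs on which A raises: an empty dict (max() on an empty
-- sequence, ValueError) and an empty fruitpattern (fruitpattern[-1], IndexError).
def Pre_nfruits (dictionary : List (String × Int)) (fruitpattern : String) : Prop :=
  dictionary ≠ [] ∧ fruitpattern ≠ ""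
instance (dictionary : List (String × Int)) (fruitpattern : String) : Decidable (Pre_nfruits dictionary fruitpattern) := by unfold Pre_nfruits; infer_instance
def pvWitness_nfruits : (List (String × Int)) × String := ([("a", 1), ("b", 2)], "ab")

def Spec_nfruits (dictionary : List (String × Int)) (fruitpattern : String) (out : Int) : Prop := out = nfruits_alt dictionary fruitpattern
instance (dictionary : List (String × Int)) (fruitpattern : String) (out : Int) : Decidable (Spec_nfruits dictionary fruitpattern out) := by unfold Spec_nfruits; infer_instance

-- ===== CLAIM (what is proved, stated in full; the proofs are below) =====
def Claim_equal_nfruits : Prop := ∀ (dictionary : List (String × Int)) (fruitpattern : String), Dom_nfruits dictionary fruitpattern → Pre_nfruits dictionary fruitpattern → Spec_nfruits dictionary fruitpattern (nfruits dictionary fruitpattern)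

-- ===== LEMMAS AND PROOFS =====

-- generic "update values of existing keys in place" fold: keys unchanged, pointwise getD
theorem pvFoldUpd (u : String → Int → Option Int) (ks : List String)
    (d : PySem.Dict String Int)
    (hsub : ∀ k ∈ ks, k ∈ d.keys) (hnod : ks.Nodup) :
    (ks.foldl (fun d key => match u key (d.getD key 0) with
        | some w => d.insert key w | none => d) d).keys = d.keys ∧
    ∀ k, (ks.foldl (fun d key => match u key (d.getD key 0) with
        | some w => d.insert key w | none => d) d).getD k 0 =
      if k ∈ ks then ((u k (d.getD k 0)).getD (d.getD k 0)) else d.getD k 0 := by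
  induction ks generalizing d with
  | nil => simp
  | cons a ks ih =>
    simp only [List.foldl_cons]
    have ha : a ∈ d.keys := hsub a (by simp)
    have hca : d.contains a = true := (PySem.Dict.contains_iff_mem_keys d a).2 ha
    have hnod' : ks.Nodup := (List.nodup_cons.1 hnod).2
    have hans : a ∉ ks := (List.nodup_cons.1 hnod).1
    set d' : PySem.Dict String Int := (match u a (d.getD a 0) with
        | some w => d.insert a w | none => d) with hd'
    have hkeys' : d'.keys = d.keys := by
      rw [hd']; cases u a (d.getD a 0) with
      | none => rfl
      | some w => exact PySem.Dict.keys_insert_of_contains d w hca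
    have hgetD' : ∀ k, d'.getD k 0 = if k = a then (u a (d.getD a 0)).getD (d.getD a 0) else d.getD k 0 := by
      intro k
      rw [hd']; cases u a (d.getD a 0) with
      | none => simp [Option.getD]; intro h; subst h; rfl
      | some w => simp [PySem.Dict.getD_insert]
    have hsub' : ∀ k ∈ ks, k ∈ d'.keys := by
      intro k hk; rw [hkeys']; exact hsub k (by simp [hk])
    obtain ⟨ihk, ihg⟩ := ih d' hsub' hnod'
    constructor
    · rw [ihk, hkeys']
    · intro k
      rw [ihg k]
      by_cases hka : k = a
      · subst hka
        simp [hans, hgetD' k]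
      · by_cases hks : k ∈ ks
        · simp [hks, hka, hgetD' k]
        · simp [hks, hka, hgetD' k]

-- A's inner loop over the keys: every value moves by -1 (key = t) or +1
theorem pvInner (t : String) (d : PySem.Dict String Int) (hnod : d.keys.Nodup) :
    (nfruitsInner t d).keys = d.keys ∧
    ∀ k ∈ d.keys, (nfruitsInner t d).getD k 0 =
      if k = t then d.getD k 0 - 1 else d.getD k 0 + 1 := by
  have hfun : (fun (d : PySem.Dict String Int) key =>
      if key == t then d.insert key (d.getD key 0 - 1) else d.insert key (d.getD key 0 + 1))
      = (fun (d : PySem.Dict String Int) key =>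
          match (fun (key : String) (v : Int) => some (if key = t then v - 1 else v + 1)) key (d.getD key 0) with
        | some w => d.insert key w | none => d) := by
    funext d k; by_cases h : k = t <;> simp [h]
  unfold nfruitsInner
  rw [hfun]
  obtain ⟨hk, hg⟩ := pvFoldUpd (fun key v => some (if key = t then v - 1 else v + 1))
      d.keys d (fun k hk => hk) hnod
  exact ⟨hk, fun k hk => by rw [hg k]; simp [hk]⟩

-- A's outer loop over a list of target characters
theorem pvOuter (ts : List String) (d : PySem.Dict String Int) (hnod : d.keys.Nodup) :
    (ts.foldl (fun d t => nfruitsInner t d) d).keys = d.keys ∧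
    ∀ k ∈ d.keys, (ts.foldl (fun d t => nfruitsInner t d) d).getD k 0
      = d.getD k 0 + (ts.length : Int) - 2 * (ts.count k : Int) := by
  induction ts generalizing d with
  | nil => simp
  | cons t ts ih =>
    obtain ⟨hk1, hg1⟩ := pvInner t d hnod
    obtain ⟨hk2, hg2⟩ := ih (nfruitsInner t d) (hk1 ▸ hnod)
    refine ⟨by rw [List.foldl_cons, hk2, hk1], ?_⟩
    intro k hk
    rw [List.foldl_cons, hg2 k (hk1 ▸ hk), hg1 k hk]
    by_cases h : k = t
    · simp [h]; ring
    · simp [h, Ne.symm h]; ring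

-- a dict with nodup keys is determined by its keys and getD
theorem pvItems (d : PySem.Dict String Int) (h : d.keys.Nodup) :
    d.items = d.keys.map (fun k => (k, d.getD k 0)) := by
  have hkeys : d.keys = d.items.map Prod.fst := by simp [PySem.Dict.keys]
  rw [hkeys, List.map_map]
  conv_lhs => rw [← List.map_id d.items]
  refine List.map_congr_left ?_
  intro p hp
  have hg : d.getD p.1 0 = p.2 :=
    PySem.Dict.getD_of_mem_items d (by simpa using hp) h 0
  simp [Function.comp, hg]

theorem nfruits_spec : Claim_equal_nfruits := by
  intro dictionary s _hdom hpre
  obtain ⟨hdne, hsne⟩ := hpre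
  unfold Spec_nfruits nfruits nfruits_alt
  dsimp only
  -- abbreviations
  have hLne : s.toList ≠ [] := by
    intro hn; apply hsne
    have := congrArg String.ofList hn
    simpa using this
  have hm : 0 < s.toList.length := List.length_pos_iff.2 hLne
  have hlen : PySem.Str.len s = (s.toList.length : Int) := PySem.Str.len_eq s
  have hsub1 : PySem.Str.len s - 1 = ((s.toList.length - 1 : Nat) : Int) := by
    rw [hlen]; omega
  rw [hsub1, PySem.List.pyRange_zero_natCast]
  -- the prefix characters, as one-character strings
  have hts : (List.range (s.toList.length - 1)).map
        (fun (j : Nat) => ((PySem.Str.pyGet? s (j : Int)).elim "" fun c => String.mk [c]))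
      = s.toList.dropLast.map (fun c => String.mk [c]) := by
    apply List.ext_getElem
    · simp
    · intro i h1 h2
      simp only [List.getElem_map, List.getElem_range, List.getElem_dropLast]
      rw [PySem.Str.pyGet?_natCast]
      have hi : i < s.toList.length := by simp only [List.length_map, List.length_dropLast] at h2; omega
      simp [List.getElem?_eq_getElem hi]
  -- rewrite A's outer loop as a fold over those strings
  have hA : ∀ d0 : PySem.Dict String Int,
      List.foldl (fun d i => nfruitsInner ((PySem.Str.pyGet? s i).elim "" fun c => String.mk [c]) d)
          d0 ((List.range (s.toList.length - 1)).map (fun (k : Nat) => (k : Int)))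
      = List.foldl (fun d t => nfruitsInner t d) d0 (s.toList.dropLast.map (fun c => String.mk [c])) := by
    intro d0
    rw [← hts]
    simp only [List.foldl_map]
  rw [hA]
  -- the last character: s[len-1] = s[-1]
  have hlast : (PySem.Str.pyGet? s ((s.toList.length - 1 : Nat) : Int)) = PySem.Str.pyGet? s (-1) := by
    rw [PySem.Str.pyGet?_natCast, PySem.Str.pyGet?_eq, PySem.Chars.pyGet?_eq_listPyGet?,
      PySem.List.pyGet?_neg_one]
    exact (List.getLast?_eq_getElem? (l := s.toList)).symm
  rw [hlast]
  -- B's slice is the same prefix list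
  rw [PySem.Str.slice_to_neg_one]
  set f : Char → String := fun c => String.mk [c] with hf
  set lastS : String := (PySem.Str.pyGet? s (-1)).elim "" f with hlastS
  set prefS : List String := s.toList.dropLast.map f with hprefS
  set d0 : PySem.Dict String Int := PySem.Dict.ofList dictionary with hd0
  have hnod0 : d0.keys.Nodup := PySem.Dict.nodup_keys_ofList dictionary
  obtain ⟨hk1, hg1⟩ := pvOuter prefS d0 hnod0
  set d1 : PySem.Dict String Int := prefS.foldl (fun d t => nfruitsInner t d) d0 with hd1
  have hnod1 : d1.keys.Nodup := by rw [hk1]; exact hnod0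
  -- the final conditional pass
  have hfun2 : (fun (d : PySem.Dict String Int) key =>
      if (key == lastS) = true then d.insert key (d.getD key 0 - 1) else d)
      = (fun (d : PySem.Dict String Int) key =>
          match (fun (key : String) (v : Int) => if key = lastS then some (v - 1) else none) key (d.getD key 0) with
        | some w => d.insert key w | none => d) := by
    funext d k; by_cases h : k = lastS <;> simp [h]
  rw [hfun2]
  obtain ⟨hk2, hg2⟩ := pvFoldUpd (fun key v => if key = lastS then some (v - 1) else none)
      d1.keys d1 (fun k hk => hk) hnod1
  set d2 : PySem.Dict String Int := d1.keys.foldl (fun d key =>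
      match (fun (key : String) (v : Int) => if key = lastS then some (v - 1) else none) key (d.getD key 0) with
        | some w => d.insert key w | none => d) d1 with hd2
  have hnod2 : d2.keys.Nodup := by rw [hk2]; exact hnod1
  -- both value lists coincide
  have hvals : d2.values = d0.items.map (fun kv =>
      kv.2 + ((s.toList.length - 1 : Nat) : Int) -
        2 * (prefS.foldl (fun d s => d.insert s (d.getD s 0 + 1)) PySem.Dict.empty).getD kv.1 0 -
        if (kv.1 == lastS) = true then 1 else 0) := by
    have hv2 : d2.values = d2.items.map Prod.snd := by simp [PySem.Dict.values]
    rw [hv2, pvItems d2 hnod2, hk2, hk1]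
    have hkeys0 : d0.keys = d0.items.map Prod.fst := by simp [PySem.Dict.keys]
    rw [hkeys0, List.map_map, List.map_map]
    refine List.map_congr_left ?_
    intro kv hkv
    have hkmem : kv.1 ∈ d0.keys := PySem.Dict.mem_keys_of_mem_items d0 hkv
    have hval0 : d0.getD kv.1 0 = kv.2 :=
      PySem.Dict.getD_of_mem_items d0 (by simpa using hkv) hnod0 0
    have hk1mem : kv.1 ∈ d1.keys := by rw [hk1]; exact hkmem
    have hcnt : (prefS.foldl (fun d s => d.insert s (d.getD s 0 + 1)) PySem.Dict.empty).getD kv.1 0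
        = (prefS.count kv.1 : Int) := by
      rw [PySem.Dict.getD_foldl_insert_add_one, PySem.Dict.getD_empty]; ring
    have hlenpref : (prefS.length : Int) = ((s.toList.length - 1 : Nat) : Int) := by
      rw [hprefS]; simp
    simp only [Function.comp]
    rw [hg2 kv.1]
    simp only [hk1mem, if_pos]
    rw [hg1 kv.1 hkmem, hval0, hcnt, hlenpref]
    by_cases h : kv.1 = lastS
    · simp [h]
    · simp [h]
  rw [hvals]
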